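-- pv_equiv track=rewrite | github.com/MrBrantCode/unitest_baseline | mut_generate/mist_train_cf/cf_47540/solution.py | replace_punctuation
-- ===== SOURCE A (Python) =====
-- import string
--
-- def replace_punctuation(input_string, replace_char):
--     punctuation_count = {}
--     new_string = ''.join([char if char not in string.punctuation else replace_char for char in input_string])
--
--     for char in input_string:
--         if char in string.punctuation:
--             if char in punctuation_count:
--                 punctuation_count[char] += 1
--             else:
--                 punctuation_count[char] = 1
--
--     return new_string, punctuation_count
-- ===== SOURCE B (Python) =====
-- import string
--
-- def replace_punctuation(input_string, replace_char):
--     punct = set(string.punctuation)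
--     pieces = []
--     punctuation_count = {}
--     for char in input_string:
--         if char in punct:
--             pieces.append(replace_char)
--             punctuation_count[char] = punctuation_count.get(char, 0) + 1
--         else:
--             pieces.append(char)
--     return ''.join(pieces), punctuation_count
-- ===== Notes on version B (the rewrite author's own statement) =====
-- stated objective: simpler
-- what changed: A's two traversals (a join over a per-character comprehension, then a separate counting loop with a contains-branch) are fused into one pass that builds the output pieces and tallies punctuation with dict.get(char, 0) + 1, testing membership against a precomputed punctuation set.
import Mathlib
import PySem

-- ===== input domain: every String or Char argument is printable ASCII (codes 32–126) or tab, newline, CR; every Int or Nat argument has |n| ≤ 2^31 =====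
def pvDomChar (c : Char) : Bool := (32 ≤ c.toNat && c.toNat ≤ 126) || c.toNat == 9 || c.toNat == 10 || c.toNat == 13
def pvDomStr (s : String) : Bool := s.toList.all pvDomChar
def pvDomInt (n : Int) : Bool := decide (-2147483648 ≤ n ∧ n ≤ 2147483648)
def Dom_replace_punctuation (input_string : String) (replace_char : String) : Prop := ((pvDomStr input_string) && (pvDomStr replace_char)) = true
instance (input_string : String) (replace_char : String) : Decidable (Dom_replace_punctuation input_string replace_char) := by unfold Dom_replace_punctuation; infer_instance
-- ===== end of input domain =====

-- B fuses A's two passes (join-comprehension + counting loop) into one pass with a get-with-default counter; equivalence of return values.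

-- string.punctuation (module constant both versions use)
def pyPunctuation : List Char := "!\"#$%&'()*+,-./:;<=>?@[\\]^_`{|}~".toList

-- ===== PORT A =====
-- 'char in string.punctuation' is a substring test on a 1-character needle: exactly char membership in the list
def replace_punctuation (input_string : String) (replace_char : String) : String × (List (String × Int)) :=
  let punctuation_count : PySem.Dict String Int := PySem.Dict.empty
  let new_string : String := PySem.Str.join "" (input_string.toList.map
    (fun char => if char ∈ pyPunctuation then replace_char else String.ofList [char]))
  let punctuation_count := input_string.toList.foldl (fun d char =>
    if char ∈ pyPunctuation then
      if d.contains (String.ofList [char]) then d.modify (String.ofList [char]) 0 (· + 1)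
      else d.insert (String.ofList [char]) 1
    else d) punctuation_count
  (new_string, punctuation_count.items)

-- ===== PORT B =====
def replace_punctuation_alt (input_string : String) (replace_char : String) : String × (List (String × Int)) :=
  let punct : PySem.Set Char := PySem.Set.ofList pyPunctuation
  let res := input_string.toList.foldl
    (fun (s : List String × PySem.Dict String Int) char =>
      if char ∈ punct then
        (s.1 ++ [replace_char], s.2.insert (String.ofList [char]) (s.2.getD (String.ofList [char]) 0 + 1))
      else (s.1 ++ [String.ofList [char]], s.2))
    ([], PySem.Dict.empty)
  (PySem.Str.join "" res.1, res.2.items)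

-- ===== PRECONDITION & SPEC =====
def Spec_replace_punctuation (input_string : String) (replace_char : String) (out : String × (List (String × Int))) : Prop := out = replace_punctuation_alt input_string replace_char
instance (input_string : String) (replace_char : String) (out : String × (List (String × Int))) : Decidable (Spec_replace_punctuation input_string replace_char out) := by unfold Spec_replace_punctuation; infer_instance

-- ===== CLAIM (what is proved, stated in full; the proofs are below) =====
def Claim_equal_replace_punctuation : Prop := ∀ (input_string : String) (replace_char : String), Dom_replace_punctuation input_string replace_char → Spec_replace_punctuation input_string replace_char (replace_punctuation input_string replace_char)

-- ===== LEMMAS AND PROOFS =====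

-- set(string.punctuation): the constant has no duplicates, so the set is the list itself
theorem punct_ofList : PySem.Set.ofList pyPunctuation = pyPunctuation := by decide

-- B's get-with-default update is exactly A's contains-branched update
theorem dict_step (d : PySem.Dict String Int) (k : String) :
    d.insert k (d.getD k 0 + 1) =
      if d.contains k then d.modify k 0 (· + 1) else d.insert k 1 := by
  by_cases h : d.contains k
  · simp [h, PySem.Dict.modify]
  · have h0 : d.getD k 0 = 0 := PySem.Dict.getD_of_not_contains d 0 (by simpa using h)
    simp [h, h0]

-- B's fused loop splits into A's two independent loops
theorem fused_split (l : List Char) (rc : String) :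
    l.foldl
      (fun (s : List String × PySem.Dict String Int) char =>
        if char ∈ pyPunctuation then
          (s.1 ++ [rc], s.2.insert (String.ofList [char]) (s.2.getD (String.ofList [char]) 0 + 1))
        else (s.1 ++ [String.ofList [char]], s.2))
      ([], PySem.Dict.empty)
    = (l.map (fun char => if char ∈ pyPunctuation then rc else String.ofList [char]),
       l.foldl (fun d char =>
         if char ∈ pyPunctuation then
           if d.contains (String.ofList [char]) then d.modify (String.ofList [char]) 0 (· + 1)
           else d.insert (String.ofList [char]) 1
         else d) PySem.Dict.empty) := by
  have hstep :
      (fun (s : List String × PySem.Dict String Int) char =>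
        if char ∈ pyPunctuation then
          (s.1 ++ [rc], s.2.insert (String.ofList [char]) (s.2.getD (String.ofList [char]) 0 + 1))
        else (s.1 ++ [String.ofList [char]], s.2))
      = (fun (s : List String × PySem.Dict String Int) char =>
          (s.1 ++ [if char ∈ pyPunctuation then rc else String.ofList [char]],
           if char ∈ pyPunctuation then
             if s.2.contains (String.ofList [char]) then s.2.modify (String.ofList [char]) 0 (· + 1)
             else s.2.insert (String.ofList [char]) 1
           else s.2)) := by
    funext s c
    by_cases h : c ∈ pyPunctuation
    · simp [h, dict_step]
    · simp [h]
  rw [hstep,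
    PySem.List.foldl_prod_mk
      (f := fun (acc : List String) char => acc ++ [if char ∈ pyPunctuation then rc else String.ofList [char]])
      (g := fun (d : PySem.Dict String Int) char =>
        if char ∈ pyPunctuation then
          if d.contains (String.ofList [char]) then d.modify (String.ofList [char]) 0 (· + 1)
          else d.insert (String.ofList [char]) 1
        else d),
    PySem.List.foldl_append_singleton_eq_map]
  simp

-- ===== VERDICT (by name: the statement is the Claim_ definition above) =====
theorem replace_punctuation_spec : Claim_equal_replace_punctuation := by
  intro input_string replace_char _
  unfold Spec_replace_punctuation replace_punctuation replace_punctuation_alt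
  simp only [punct_ofList, fused_split]
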